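-- pv_equiv track=rewrite | github.com/omh/yoshimi | yoshimi/url.py | _context_id
-- ===== SOURCE A (Python) =====
-- def _context_id(path_elements, separator='-'):
--     """Extracts id and slug from a tuple of URL parts
--
--     :param tuple url_parts: URL to extract id from
--     :param str separator: Character to use to separate URL from the id
--     :return tuple: (int id, tuple url_parts) or (None, None)
--     """
--     mutable_url_parts = list(path_elements[:])
--     for url in path_elements:
--         part = mutable_url_parts.pop()
--         try:
--             id = int(part.split(separator)[-1])
--             if id > 0:
--                 mutable_url_parts.append(part)
--                 return (id, mutable_url_parts)
--         except (KeyError, ValueError):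
--             continue
--
--     return None, None
-- ===== SOURCE B (Python) =====
-- def _context_id(path_elements, separator='-'):
--     """Extracts id and slug from a tuple of URL parts (index scan from the end)."""
--     for i in range(len(path_elements) - 1, -1, -1):
--         try:
--             id = int(path_elements[i].split(separator)[-1])
--         except (KeyError, ValueError):
--             continue
--         if id > 0:
--             return (id, list(path_elements[:i + 1]))
--     return None, None
-- ===== Notes on version B (the rewrite author's own statement) =====
-- stated objective: simpler
-- what changed: Replaces the mutable-copy pop/re-append stack loop by a downward index loop that returns the prefix directly via a slice.
import Mathlib
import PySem

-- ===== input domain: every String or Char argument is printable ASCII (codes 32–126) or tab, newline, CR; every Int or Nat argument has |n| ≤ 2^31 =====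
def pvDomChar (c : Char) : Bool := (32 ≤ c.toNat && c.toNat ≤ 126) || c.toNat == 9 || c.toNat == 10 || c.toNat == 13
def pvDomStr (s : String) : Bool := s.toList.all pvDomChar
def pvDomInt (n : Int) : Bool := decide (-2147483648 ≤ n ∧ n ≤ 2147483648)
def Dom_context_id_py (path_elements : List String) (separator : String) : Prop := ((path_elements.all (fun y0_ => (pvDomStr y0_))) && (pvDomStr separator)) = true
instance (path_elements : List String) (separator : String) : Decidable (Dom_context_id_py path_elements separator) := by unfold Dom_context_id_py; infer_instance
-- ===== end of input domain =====

-- B replaces A's mutable-copy pop/re-append stack loop by a downward index loop returning the prefix by a slice (objective: simpler).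

-- ===== PORT A =====
-- the 'for url in path_elements' loop; 'urls' counts the remaining iterations, 'ms' is mutable_url_parts
def context_id_py_loop (separator : String) : List String → List String → Option Int × Option (List String)
  | [], _ms => (none, none)
  | _url :: urls, ms =>
    match PySem.List.pop? ms with          -- part = mutable_url_parts.pop(); none = IndexError (never reached: ms outlasts the loop)
    | none => (none, none)
    | some (part, rest) =>
      match PySem.Str.split? part separator with    -- part.split(separator); none = ValueError, caught → continue
      | none => context_id_py_loop separator urls rest
      | some pieces =>
        match PySem.List.pyGet? pieces (-1) with    -- [-1]; split? never returns [], so none never reached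
        | none => (none, none)
        | some lastPiece =>
          match PySem.Int.ofStr? lastPiece with     -- int(...); none = ValueError, caught → continue
          | none => context_id_py_loop separator urls rest
          | some id =>
            if id > 0 then (some id, some (rest ++ [part]))
            else context_id_py_loop separator urls rest

def context_id_py (path_elements : List String) (separator : String) : Option Int × Option (List String) :=
  context_id_py_loop separator path_elements path_elements

-- ===== PORT B =====
-- 'for i in range(len(path_elements)-1, -1, -1)': fuel k means the next index examined is k-1
def context_id_py_alt_loop (path_elements : List String) (separator : String) : Nat → Option Int × Option (List String)
  | 0 => (none, none)
  | Nat.succ i =>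
    match PySem.List.pyGet? path_elements (i : Int) with   -- path_elements[i]; i < len, so some
    | none => (none, none)
    | some part =>
      match (PySem.Str.split? part separator).bind (fun ps => PySem.List.pyGet? ps (-1)) |>.bind PySem.Int.ofStr? with
      | none => context_id_py_alt_loop path_elements separator i     -- (KeyError, ValueError) → continue
      | some id =>
        if id > 0 then (some id, some (PySem.List.slice path_elements none (some ((i : Int) + 1))))
        else context_id_py_alt_loop path_elements separator i

def context_id_py_alt (path_elements : List String) (separator : String) : Option Int × Option (List String) :=
  context_id_py_alt_loop path_elements separator path_elements.length

-- ===== PRECONDITION & SPEC =====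
def Spec_context_id_py (path_elements : List String) (separator : String) (out : Option Int × Option (List String)) : Prop := out = context_id_py_alt path_elements separator
instance (path_elements : List String) (separator : String) (out : Option Int × Option (List String)) : Decidable (Spec_context_id_py path_elements separator out) := by unfold Spec_context_id_py; infer_instance

-- ===== CLAIM (what is proved, stated in full; the proofs are below) =====
def Claim_equal_context_id_py : Prop := ∀ (path_elements : List String) (separator : String), Dom_context_id_py path_elements separator → Spec_context_id_py path_elements separator (context_id_py path_elements separator)

-- ===== LEMMAS AND PROOFS =====

-- splitOn's worker never returns the empty list (its base cases cons onto the accumulator)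
theorem splitOn_go_ne_nil (sep : List Char) : ∀ (fuel : Nat) (l cur : List Char) (acc : List (List Char)),
    PySem.Chars.splitOn.go sep fuel l cur acc ≠ [] := by
  intro fuel
  induction fuel with
  | zero => intro l cur acc; unfold PySem.Chars.splitOn.go; simp
  | succ f ih =>
    intro l cur acc
    cases l with
    | nil => unfold PySem.Chars.splitOn.go; simp
    | cons c rest =>
      unfold PySem.Chars.splitOn.go
      split
      · exact ih _ _ _
      · exact ih _ _ _

-- s.split(sep) never returns an empty list, so '[-1]' never raises in either program
theorem split?_some_ne_nil (s sep : String) (l : List String) (h : PySem.Str.split? s sep = some l) : l ≠ [] := by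
  unfold PySem.Str.split? at h
  simp only [Option.map_eq_some_iff] at h
  obtain ⟨cs, hcs, rfl⟩ := h
  unfold PySem.Chars.split? at hcs
  split at hcs
  · simp at hcs
  · simp only [Option.some_inj] at hcs
    subst hcs
    unfold PySem.Chars.splitOn
    simp [splitOn_go_ne_nil]

-- A's loop on (urls, pe.take k) computes B's loop at fuel k, as long as urls can fuel k iterations.
theorem context_id_loop_eq (separator : String) (pe : List String) :
    ∀ (k : Nat) (urls : List String), k ≤ urls.length → k ≤ pe.length →
      context_id_py_loop separator urls (pe.take k) = context_id_py_alt_loop pe separator k := by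
  intro k
  induction k with
  | zero =>
    intro urls _ _
    cases urls <;>
      simp only [context_id_py_loop, context_id_py_alt_loop, List.take_zero,
        show PySem.List.pop? ([] : List String) = none from rfl]
  | succ i ih =>
    intro urls hu hp
    cases urls with
    | nil => simp at hu
    | cons u urls' =>
      have hi : i < pe.length := by omega
      have htake : pe.take (i + 1) = pe.take i ++ [pe[i]] := by
        simp [List.take_add_one]
      rw [context_id_py_loop, htake, PySem.List.pop?_last]
      rw [context_id_py_alt_loop]
      rw [PySem.List.pyGet?_natCast]
      simp only [List.getElem?_eq_getElem hi]
      have hslice : PySem.List.slice pe none (some ((i : Int) + 1)) = pe.take (i + 1) := by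
        have := PySem.List.slice_to_natCast pe (i + 1)
        push_cast at this
        rw [← this]
      cases hsp : PySem.Str.split? pe[i] separator with
      | none =>
        simpa using ih urls' (by simp at hu; omega) (le_of_lt hi)
      | some pieces =>
        simp only [Option.bind_some]
        cases hlast : PySem.List.pyGet? pieces (-1) with
        | none =>
          exfalso
          have hne := split?_some_ne_nil _ _ _ hsp
          rw [PySem.List.pyGet?_neg_one, List.getLast?_eq_none_iff] at hlast
          exact hne hlast
        | some lastPiece =>
          simp only [Option.bind_some]
          cases hid : PySem.Int.ofStr? lastPiece with
          | none =>
            exact ih urls' (by simp at hu; omega) (le_of_lt hi)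
          | some id =>
            by_cases h0 : id > 0
            · rw [hslice, htake]; simp [h0]
            · simp only [gt_iff_lt, h0, if_false]
              exact ih urls' (by simp at hu; omega) (le_of_lt hi)

-- ===== VERDICT (by name: the statement is the Claim_ definition above) =====
theorem context_id_py_spec : Claim_equal_context_id_py := by
  intro pe sep _
  unfold Spec_context_id_py context_id_py context_id_py_alt
  have := context_id_loop_eq sep pe pe.length pe (le_refl _) (le_refl _)
  simpa using this
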